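-- pv_equiv track=rewrite | github.com/moritzkoerber/adventofcode | 2022/day23/day23.py | propose_move
-- ===== SOURCE A (Python) =====
-- def propose_move(
--     elves: set, direction: str, row: int, col: int
-- ) -> tuple[bool, tuple[int, int]]:
--     match direction:
--         case "north":
--             return all(
--                 x not in elves
--                 for x in [(row - 1, col - 1), (row - 1, col), (row - 1, col + 1)]
--             ), (row - 1, col)
--         case "south":
--             return all(
--                 x not in elves
--                 for x in [(row + 1, col - 1), (row + 1, col), (row + 1, col + 1)]
--             ), (row + 1, col)
--         case "west":
--             return all(
--                 x not in elves
--                 for x in [(row - 1, col - 1), (row, col - 1), (row + 1, col - 1)]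
--             ), (row, col - 1)
--         case "east":
--             return all(
--                 x not in elves
--                 for x in [(row - 1, col + 1), (row, col + 1), (row + 1, col + 1)]
--             ), (row, col + 1)
-- ===== SOURCE B (Python) =====
-- def propose_move(elves, direction, row, col):
--     # Scan the elf set once: the move is clear iff no elf lies in the
--     # three-cell band adjacent to the target (arithmetic band test),
--     # instead of looking up three constructed cells in the set.
--     vertical = direction in ("north", "south")
--     if not (vertical or direction in ("west", "east")):
--         return None
--     d = -1 if direction in ("north", "west") else 1
--     if vertical:
--         clear = not any(r == row + d and abs(c - col) <= 1 for r, c in elves)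
--         return clear, (row + d, col)
--     else:
--         clear = not any(c == col + d and abs(r - row) <= 1 for r, c in elves)
--         return clear, (row, col + d)
-- ===== Notes on version B (the rewrite author's own statement) =====
-- stated objective: alternative
-- what changed: Inverts the traversal: instead of constructing three neighbor cells per direction and testing each for membership in the elf set, B makes a single pass over the elves and checks arithmetically whether any elf lies in the three-cell band adjacent to the one-step target (row/column equality plus abs-difference <= 1); the four-branch match disappears into a vertical/horizontal split with a sign.
-- outside the precondition, e.g. on propose_move(set(), 'up', 0, 0): A returns None, B returns None
import Mathlib
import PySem

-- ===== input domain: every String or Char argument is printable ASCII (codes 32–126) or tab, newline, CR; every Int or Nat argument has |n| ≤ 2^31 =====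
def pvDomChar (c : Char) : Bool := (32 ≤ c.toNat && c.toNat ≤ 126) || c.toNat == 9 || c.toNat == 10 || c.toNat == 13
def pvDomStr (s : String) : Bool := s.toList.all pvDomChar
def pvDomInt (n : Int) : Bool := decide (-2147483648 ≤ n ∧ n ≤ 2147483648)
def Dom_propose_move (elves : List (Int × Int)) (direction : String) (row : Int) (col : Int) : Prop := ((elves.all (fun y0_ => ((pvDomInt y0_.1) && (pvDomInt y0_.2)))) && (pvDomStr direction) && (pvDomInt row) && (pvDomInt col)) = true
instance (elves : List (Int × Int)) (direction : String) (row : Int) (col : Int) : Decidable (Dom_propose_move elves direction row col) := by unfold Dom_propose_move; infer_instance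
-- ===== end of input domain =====

-- B inverts the traversal: one pass over the elf set with an arithmetic band test
-- (row/column equality plus |difference| ≤ 1) instead of three membership lookups.

-- ===== PORT A =====
def propose_move (elves : List (Int × Int)) (direction : String) (row : Int) (col : Int) : Bool × (Int × Int) :=
  if direction = "north" then
    (([(row - 1, col - 1), (row - 1, col), (row - 1, col + 1)] : List (Int × Int)).all
      (fun x => !(PySem.Set.contains elves x)), (row - 1, col))
  else if direction = "south" then
    (([(row + 1, col - 1), (row + 1, col), (row + 1, col + 1)] : List (Int × Int)).all
      (fun x => !(PySem.Set.contains elves x)), (row + 1, col))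
  else if direction = "west" then
    (([(row - 1, col - 1), (row, col - 1), (row + 1, col - 1)] : List (Int × Int)).all
      (fun x => !(PySem.Set.contains elves x)), (row, col - 1))
  else if direction = "east" then
    (([(row - 1, col + 1), (row, col + 1), (row + 1, col + 1)] : List (Int × Int)).all
      (fun x => !(PySem.Set.contains elves x)), (row, col + 1))
  else (false, (0, 0))  -- Python falls through and returns None here; excluded by Pre_

-- ===== PORT B =====
def propose_move_alt (elves : List (Int × Int)) (direction : String) (row : Int) (col : Int) : Bool × (Int × Int) :=
  let vertical := direction = "north" || direction = "south"
  if !(vertical || direction = "west" || direction = "east") then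
    (false, (0, 0))  -- Python B returns None here; excluded by Pre_
  else
    let d : Int := if direction = "north" || direction = "west" then -1 else 1
    if vertical then
      (!(elves.any fun rc => rc.1 == row + d && decide (|rc.2 - col| ≤ 1)), (row + d, col))
    else
      (!(elves.any fun rc => rc.2 == col + d && decide (|rc.1 - row| ≤ 1)), (row, col + d))

-- ===== PRECONDITION & SPEC =====
-- Pre_ excludes directions other than the four literals: there Python A falls off the match and
-- returns None, not a value of the declared tuple type (and B returns None too).
def Pre_propose_move (elves : List (Int × Int)) (direction : String) (row : Int) (col : Int) : Prop :=
  direction = "north" ∨ direction = "south" ∨ direction = "west" ∨ direction = "east"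
instance (elves : List (Int × Int)) (direction : String) (row : Int) (col : Int) : Decidable (Pre_propose_move elves direction row col) := by unfold Pre_propose_move; infer_instance

def pvWitness_propose_move : (List (Int × Int)) × String × Int × Int := ([(0, 0), (2, 1)], "north", 1, 1)

def Spec_propose_move (elves : List (Int × Int)) (direction : String) (row : Int) (col : Int) (out : Bool × (Int × Int)) : Prop := out = propose_move_alt elves direction row col
instance (elves : List (Int × Int)) (direction : String) (row : Int) (col : Int) (out : Bool × (Int × Int)) : Decidable (Spec_propose_move elves direction row col out) := by unfold Spec_propose_move; infer_instance

-- ===== CLAIM =====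
def Claim_equal_propose_move : Prop := ∀ (elves : List (Int × Int)) (direction : String) (row : Int) (col : Int), Dom_propose_move elves direction row col → Pre_propose_move elves direction row col → Spec_propose_move elves direction row col (propose_move elves direction row col)

-- ===== LEMMAS AND PROOFS =====

-- B's negated scan over the elves equals A's "all three cells free" test whenever the
-- band predicate characterises exactly the three cells.
theorem pv_scan_eq_all3 (elves : List (Int × Int)) (p : (Int × Int) → Bool) (a b c : Int × Int)
    (h : ∀ e, p e = true ↔ (e = a ∨ e = b ∨ e = c)) :
    (!(elves.any p)) = ([a, b, c].all (fun x => !(PySem.Set.contains elves x))) := by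
  rw [Bool.eq_iff_iff, Bool.not_eq_true', List.any_eq_false]
  simp only [List.all_cons, List.all_nil, Bool.and_true, Bool.and_eq_true,
    Bool.not_eq_true', ← Bool.not_eq_true, PySem.Set.contains_iff]
  constructor
  · intro hf
    exact ⟨fun ha => hf a ha ((h a).mpr (Or.inl rfl)),
           fun hb => hf b hb ((h b).mpr (Or.inr (Or.inl rfl))),
           fun hc => hf c hc ((h c).mpr (Or.inr (Or.inr rfl)))⟩
  · rintro ⟨ha, hb, hc⟩ e he hpe
    rcases (h e).mp hpe with rfl | rfl | rfl
    exacts [ha he, hb he, hc he]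

-- ===== VERDICT =====
theorem propose_move_spec : Claim_equal_propose_move := by
  intro elves direction row col _ hpre
  unfold Spec_propose_move
  rcases hpre with h | h | h | h <;> subst h <;>
    simp only [propose_move, propose_move_alt, String.reduceEq, reduceIte, decide_true,
      decide_false, Bool.or_false, Bool.false_or, Bool.or_true, Bool.true_or, Bool.not_true,
      Bool.not_false, Bool.false_eq_true, Bool.true_eq_false, if_false, if_true,
      show ∀ x : Int, x + (-1) = x - 1 from fun x => by ring]
  · rw [pv_scan_eq_all3 elves _ (row - 1, col - 1) (row - 1, col) (row - 1, col + 1)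
      (fun e => by obtain ⟨r, c⟩ := e; simp only [beq_iff_eq, Bool.and_eq_true,
        decide_eq_true_eq, abs_le, Prod.mk.injEq]; omega)]
  · rw [pv_scan_eq_all3 elves _ (row + 1, col - 1) (row + 1, col) (row + 1, col + 1)
      (fun e => by obtain ⟨r, c⟩ := e; simp only [beq_iff_eq, Bool.and_eq_true,
        decide_eq_true_eq, abs_le, Prod.mk.injEq]; omega)]
  · rw [pv_scan_eq_all3 elves _ (row - 1, col - 1) (row, col - 1) (row + 1, col - 1)
      (fun e => by obtain ⟨r, c⟩ := e; simp only [beq_iff_eq, Bool.and_eq_true,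
        decide_eq_true_eq, abs_le, Prod.mk.injEq]; omega)]
  · rw [pv_scan_eq_all3 elves _ (row - 1, col + 1) (row, col + 1) (row + 1, col + 1)
      (fun e => by obtain ⟨r, c⟩ := e; simp only [beq_iff_eq, Bool.and_eq_true,
        decide_eq_true_eq, abs_le, Prod.mk.injEq]; omega)]
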